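-- pv_equiv track=rewrite | github.com/KimJyun/Algorithm-1 | Backjoon/15953/bj_15953.py | calcPrice
-- ===== SOURCE A (Python) =====
-- def calcPrice(rank_2017, rank_2018) :
--     price_2017 = [[1,500],[2,300],[3,200],[4,50],[5,30],[6,10]]
--     price_2018 = [[1,512],[2,256],[4,128],[8,64],[16,32]]
--     price_list = [price_2017,price_2018]
--     my_price   = 0
--
--     for no,year in enumerate(price_list) :
--         current_rank = 0
--         if no == 0  : my_rank = rank_2017
--         else        : my_rank = rank_2018
--
--         for rank in range(len(year)) :
--             each_person = year[rank][0]
--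
--             for _ in range(each_person) :
--                 current_rank += 1
--                 if (current_rank == my_rank) :
--                     my_price += year[rank][1]
--                     break
--                 else : continue
--
--     return my_price
-- ===== SOURCE B (Python) =====
-- def tier_prize(tiers, r):
--     lo = 0
--     for cnt, prize in tiers:
--         hi = lo + cnt
--         if lo < r <= hi:
--             return prize
--         lo = hi
--     return 0
--
-- def calcPrice(rank_2017, rank_2018):
--     tiers_2017 = [(1, 500), (2, 300), (3, 200), (4, 50), (5, 30), (6, 10)]
--     tiers_2018 = [(1, 512), (2, 256), (4, 128), (8, 64), (16, 32)]
--     return tier_prize(tiers_2017, rank_2017) + tier_prize(tiers_2018, rank_2018)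
-- ===== Notes on version B (the rewrite author's own statement) =====
-- stated objective: simpler
-- what changed: Replaces A's innermost per-person counting loop (incrementing current_rank once per seat) with cumulative tier thresholds: one scan over the tiers checking lo < rank <= lo+count, summed for both years via a shared helper.
import Mathlib
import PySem

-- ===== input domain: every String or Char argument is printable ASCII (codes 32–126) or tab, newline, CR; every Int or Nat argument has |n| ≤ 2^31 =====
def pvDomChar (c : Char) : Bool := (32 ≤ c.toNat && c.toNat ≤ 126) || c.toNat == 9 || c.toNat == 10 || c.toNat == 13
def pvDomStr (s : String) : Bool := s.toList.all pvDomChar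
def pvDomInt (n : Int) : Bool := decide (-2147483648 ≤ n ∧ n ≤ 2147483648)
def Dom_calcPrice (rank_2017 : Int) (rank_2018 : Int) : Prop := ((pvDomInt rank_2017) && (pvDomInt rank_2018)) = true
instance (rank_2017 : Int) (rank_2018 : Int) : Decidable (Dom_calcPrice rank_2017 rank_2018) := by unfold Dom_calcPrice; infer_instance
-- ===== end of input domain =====

-- B replaces A's innermost per-person counting loop by cumulative tier thresholds (simpler).

-- ===== PORT A =====
-- inner `for _ in range(each_person)` loop: bump current_rank, on match add prize and break
def pvInnerA (n : Nat) (cr mp my prize : Int) : Int × Int :=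
  match n with
  | 0 => (cr, mp)
  | Nat.succ k =>
      let cr' := cr + 1
      if cr' = my then (cr', mp + prize)
      else pvInnerA k cr' mp my prize

-- `for rank in range(len(year))` loop, threading (current_rank, my_price)
def pvTierLoopA (year : List (Int × Int)) (cr mp my : Int) : Int × Int :=
  match year with
  | [] => (cr, mp)
  | (c, p) :: t =>
      let s := pvInnerA c.toNat cr mp my p
      pvTierLoopA t s.1 s.2 my

def calcPrice (rank_2017 : Int) (rank_2018 : Int) : Int :=
  let price_2017 : List (Int × Int) := [(1,500),(2,300),(3,200),(4,50),(5,30),(6,10)]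
  let price_2018 : List (Int × Int) := [(1,512),(2,256),(4,128),(8,64),(16,32)]
  -- enumerate over [price_2017, price_2018]: current_rank resets, my_price carries over
  let s1 := pvTierLoopA price_2017 0 0 rank_2017
  let s2 := pvTierLoopA price_2018 0 s1.2 rank_2018
  s2.2

-- ===== PORT B =====
-- scan tiers keeping the running cumulative threshold lo; prize where lo < r ≤ lo + cnt
def pvTierPrizeB (tiers : List (Int × Int)) (lo r : Int) : Int :=
  match tiers with
  | [] => 0
  | (cnt, prize) :: t =>
      let hi := lo + cnt
      if lo < r ∧ r ≤ hi then prize else pvTierPrizeB t hi r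

def calcPrice_alt (rank_2017 : Int) (rank_2018 : Int) : Int :=
  let tiers_2017 : List (Int × Int) := [(1,500),(2,300),(3,200),(4,50),(5,30),(6,10)]
  let tiers_2018 : List (Int × Int) := [(1,512),(2,256),(4,128),(8,64),(16,32)]
  pvTierPrizeB tiers_2017 0 rank_2017 + pvTierPrizeB tiers_2018 0 rank_2018

-- ===== PRECONDITION & SPEC =====
def Spec_calcPrice (rank_2017 : Int) (rank_2018 : Int) (out : Int) : Prop := out = calcPrice_alt rank_2017 rank_2018
instance (rank_2017 : Int) (rank_2018 : Int) (out : Int) : Decidable (Spec_calcPrice rank_2017 rank_2018 out) := by unfold Spec_calcPrice; infer_instance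

-- ===== CLAIM (what is proved, stated in full; the proofs are below) =====
def Claim_equal_calcPrice : Prop := ∀ (rank_2017 : Int) (rank_2018 : Int), Dom_calcPrice rank_2017 rank_2018 → Spec_calcPrice rank_2017 rank_2018 (calcPrice rank_2017 rank_2018)

-- ===== LEMMAS AND PROOFS =====
-- A's per-person loop in closed form: it awards the prize iff cr < my ≤ cr + n,
-- leaving current_rank at my on a hit and at cr + n otherwise.
theorem pvInnerA_char (n : Nat) (cr mp my p : Int) :
    pvInnerA n cr mp my p =
      if cr < my ∧ my ≤ cr + (n : Int) then (my, mp + p) else (cr + (n : Int), mp) := by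
  induction n generalizing cr with
  | zero =>
    simp only [pvInnerA, Nat.cast_zero, add_zero]
    split_ifs with h
    · exfalso; omega
    · rfl
  | succ k ih =>
    simp only [pvInnerA, ih]
    push_cast
    split_ifs
    all_goals first | rfl | (exfalso; omega) | (refine Prod.ext ?_ ?_ <;> simp <;> omega)

-- with nonnegative tier counts, a scan starting at or past the rank awards nothing
theorem pvTierPrizeB_zero (year : List (Int × Int)) (lo r : Int)
    (h : ∀ x ∈ year, 0 ≤ x.1) (hr : r ≤ lo) : pvTierPrizeB year lo r = 0 := by
  induction year generalizing lo with
  | nil => rfl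
  | cons a t ih =>
    obtain ⟨c, p⟩ := a
    simp only [pvTierPrizeB]
    have hc : 0 ≤ c := h (c, p) (List.mem_cons_self ..)
    rw [if_neg (by omega)]
    exact ih (lo + c) (fun x hx => h x (List.mem_cons_of_mem _ hx)) (by omega)

-- the tier loop of A equals the cumulative-threshold scan of B
theorem pvTierLoopA_snd (year : List (Int × Int)) (cr mp my : Int)
    (h : ∀ x ∈ year, 0 ≤ x.1) :
    (pvTierLoopA year cr mp my).2 = mp + pvTierPrizeB year cr my := by
  induction year generalizing cr mp with
  | nil => simp [pvTierLoopA, pvTierPrizeB]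
  | cons a t ih =>
    obtain ⟨c, p⟩ := a
    have hc : 0 ≤ c := h (c, p) (List.mem_cons_self ..)
    have ht : ∀ x ∈ t, 0 ≤ x.1 := fun x hx => h x (List.mem_cons_of_mem _ hx)
    simp only [pvTierLoopA, pvTierPrizeB, pvInnerA_char, Int.toNat_of_nonneg hc]
    by_cases hhit : cr < my ∧ my ≤ cr + c
    · rw [if_pos hhit, if_pos hhit]
      simp only [ih _ _ ht, pvTierPrizeB_zero t my my ht le_rfl]
      ring
    · rw [if_neg hhit, if_neg hhit]
      exact ih _ _ ht

theorem calcPrice_eq_alt (r17 r18 : Int) : calcPrice r17 r18 = calcPrice_alt r17 r18 := by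
  show (pvTierLoopA [(1,512),(2,256),(4,128),(8,64),(16,32)] 0
          (pvTierLoopA [(1,500),(2,300),(3,200),(4,50),(5,30),(6,10)] 0 0 r17).2 r18).2
      = calcPrice_alt r17 r18
  rw [pvTierLoopA_snd _ _ _ _ (by decide), pvTierLoopA_snd _ _ _ _ (by decide)]
  unfold calcPrice_alt
  ring

-- ===== VERDICT (by name: the statement is the Claim_ definition above) =====
theorem calcPrice_spec : Claim_equal_calcPrice := by
  intro r17 r18 _
  unfold Spec_calcPrice
  exact calcPrice_eq_alt r17 r18
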